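-- pv_equiv track=rewrite | github.com/nimiyakujjwal/wings1-preparation | fresco-play/wings-T4-programming-python/coding-chair-requirement.py | minChairs
-- ===== SOURCE A (Python) =====
-- def minChairs(simulations):
--     # Write your code here
--     results = []
--     for simulation in simulations:
--         total = 0
--         available = 0
--         for action in simulation:
--             if action == "C":
--                 if available > 0:
--                     available -= 1
--                 else:
--                     total += 1
--             elif action == "R":
--                 available += 1
--             elif action == "U":
--                 if available > 0:
--                     available -= 1
--                 else:
--                     total += 1
--             elif action == "L":
--                 available += 1
--         results.append(total)
--     return results
-- ===== SOURCE B (Python) =====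
-- def minChairs(simulations):
--     results = []
--     for simulation in simulations:
--         balance = 0
--         peak = 0
--         for action in simulation:
--             if action in ("C", "U"):
--                 balance += 1
--             elif action in ("R", "L"):
--                 balance -= 1
--             if balance > peak:
--                 peak = balance
--         results.append(peak)
--     return results
-- ===== Notes on version B (the rewrite author's own statement) =====
-- stated objective: simpler
-- what changed: B replaces A's two separate counters (total chairs and available chairs) by one running balance of occupied seats whose running maximum is the answer, appending the peak per simulation.
import Mathlib
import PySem

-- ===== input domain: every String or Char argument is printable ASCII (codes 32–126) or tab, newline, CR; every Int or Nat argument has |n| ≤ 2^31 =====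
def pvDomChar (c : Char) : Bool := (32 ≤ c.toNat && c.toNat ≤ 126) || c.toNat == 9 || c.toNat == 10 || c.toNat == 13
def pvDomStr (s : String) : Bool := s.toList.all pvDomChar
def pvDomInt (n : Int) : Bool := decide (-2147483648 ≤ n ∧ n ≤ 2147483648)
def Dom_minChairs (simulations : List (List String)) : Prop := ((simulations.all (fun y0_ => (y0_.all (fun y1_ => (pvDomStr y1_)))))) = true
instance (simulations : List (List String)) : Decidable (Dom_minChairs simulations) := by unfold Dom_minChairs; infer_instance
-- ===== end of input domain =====

-- B replaces A's two counters (total, available) by one running occupancy balance whose running maximum is the answer; objective: simpler.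

-- ===== PORT A =====
-- inner loop state: (total, available)
def minChairsStepA (s : Int × Int) (action : String) : Int × Int :=
  if action = "C" then
    (if s.2 > 0 then (s.1, s.2 - 1) else (s.1 + 1, s.2))
  else if action = "R" then (s.1, s.2 + 1)
  else if action = "U" then
    (if s.2 > 0 then (s.1, s.2 - 1) else (s.1 + 1, s.2))
  else if action = "L" then (s.1, s.2 + 1)
  else s

def minChairs (simulations : List (List String)) : List Int :=
  simulations.foldl (fun results simulation =>
    results ++ [(simulation.foldl minChairsStepA (0, 0)).1]) []

-- ===== PORT B =====
-- inner loop state: (balance, peak)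
def minChairsStepB (s : Int × Int) (action : String) : Int × Int :=
  let balance := if action = "C" ∨ action = "U" then s.1 + 1
                 else if action = "R" ∨ action = "L" then s.1 - 1
                 else s.1
  (balance, if balance > s.2 then balance else s.2)

def minChairs_alt (simulations : List (List String)) : List Int :=
  simulations.foldl (fun results simulation =>
    results ++ [(simulation.foldl minChairsStepB (0, 0)).2]) []

-- ===== PRECONDITION & SPEC =====
def Spec_minChairs (simulations : List (List String)) (out : List Int) : Prop := out = minChairs_alt simulations
instance (simulations : List (List String)) (out : List Int) : Decidable (Spec_minChairs simulations out) := by unfold Spec_minChairs; infer_instance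

-- ===== CLAIM (what is proved, stated in full; the proofs are below) =====
def Claim_equal_minChairs : Prop := ∀ (simulations : List (List String)), Dom_minChairs simulations → Spec_minChairs simulations (minChairs simulations)

-- ===== LEMMAS AND PROOFS =====

-- Loop invariant: if B's balance b = t - av, its peak p = t, and 0 ≤ av, then
-- A's final total equals B's final peak.
theorem minChairs_inner (sim : List String) :
    ∀ (t av b p : Int), 0 ≤ av → b = t - av → p = t →
      (sim.foldl minChairsStepA (t, av)).1 = (sim.foldl minChairsStepB (b, p)).2 := by
  induction sim with
  | nil => intro t av b p hav hb hp; simpa using hp.symm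
  | cons a rest ih =>
    intro t av b p hav hb hp
    subst hb; subst hp
    simp only [List.foldl_cons, minChairsStepA, minChairsStepB]
    by_cases hC : a = "C" <;> by_cases hR : a = "R" <;> by_cases hU : a = "U" <;>
      by_cases hL : a = "L" <;>
      (try simp only [hC, hR, hU, hL, String.reduceEq, ite_true, ite_false, or_true,
        or_self, or_false]) <;>
      split_ifs <;>
      exact ih _ _ _ _ (by omega) (by omega) (by omega)

theorem minChairs_spec' (simulations : List (List String)) :
    minChairs simulations = minChairs_alt simulations := by
  unfold minChairs minChairs_alt
  induction simulations using List.reverseRecOn with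
  | nil => rfl
  | append_singleton xs x ih =>
    simp only [List.foldl_append, List.foldl_cons, List.foldl_nil, ih]
    congr 1
    exact congrArg (fun z => [z]) (minChairs_inner x 0 0 0 0 (by omega) (by omega) rfl)

-- ===== VERDICT (by name: the statement is the Claim_ definition above) =====
theorem minChairs_spec : Claim_equal_minChairs := by
  intro sims _
  unfold Spec_minChairs
  exact minChairs_spec' sims
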